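-- pv_equiv track=rewrite | github.com/DenisSamoilyk/homework | Homework 8.py | process_strings
-- ===== SOURCE A (Python) =====
-- def process_strings(my_list):
--     new_list = []
--
--     for count, list_word in enumerate(my_list):
--         if count % 2:
--             new_list.append(list_word)
--         else:
--             conversion = str(list_word)
--             flip = conversion[::-1]
--             new_list.append(flip)
--
--     return new_list
-- ===== SOURCE B (Python) =====
-- def process_strings(my_list):
--     new_list = list(my_list)
--     new_list[::2] = [str(x)[::-1] for x in my_list[::2]]
--     return new_list
-- ===== Notes on version B (the rewrite author's own statement) =====
-- stated objective: idiomatic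
-- what changed: Replaces the enumerate loop with a per-element parity branch by copying the list and reassigning only the even-indexed strided slice with the reversed strings in one batch.
import Mathlib
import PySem

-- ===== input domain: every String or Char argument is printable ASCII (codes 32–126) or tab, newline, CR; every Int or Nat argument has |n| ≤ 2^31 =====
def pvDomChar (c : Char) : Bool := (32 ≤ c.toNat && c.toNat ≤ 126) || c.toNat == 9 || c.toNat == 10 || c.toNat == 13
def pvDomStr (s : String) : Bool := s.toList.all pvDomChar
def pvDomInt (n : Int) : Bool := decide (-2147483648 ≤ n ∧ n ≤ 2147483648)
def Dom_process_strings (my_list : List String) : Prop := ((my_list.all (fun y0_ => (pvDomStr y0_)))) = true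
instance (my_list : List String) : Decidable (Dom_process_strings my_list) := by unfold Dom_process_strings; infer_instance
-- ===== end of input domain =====

-- B copies the list and batch-reassigns the even-indexed strided slice with the reversed strings,
-- removing A's per-element parity branch (objective: idiomatic).

-- ===== PORT A =====
-- literal port of A: enumerate loop, parity branch, append to accumulator
-- (conversion[::-1] on a string is ported via String.ofList ∘ List.reverse ∘ String.toList,
--  exact by PySem.Str.slice?_none_none_neg_one)
def process_strings (my_list : List String) : List String :=
  (PySem.List.enumerate my_list 0).foldl
    (fun new_list p =>
      if PySem.Int.mod p.1 2 ≠ 0 then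
        new_list ++ [p.2]
      else
        let conversion := p.2
        let flip := String.ofList conversion.toList.reverse
        new_list ++ [flip])
    []

-- ===== PORT B =====
-- my_list[::2]: the step-2 strided slice (exact for step 2 from index 0)
def pvEveryOther (xs : List String) : List String :=
  match xs with
  | [] => []
  | [x] => [x]
  | x :: _ :: rest => x :: pvEveryOther rest

-- new_list[::2] = vs : put vs back at the even positions of xs
def pvAssignEvens (vs : List String) (xs : List String) : List String :=
  match vs, xs with
  | v :: _, [_] => [v]
  | v :: vs', _ :: y :: rest => v :: y :: pvAssignEvens vs' rest
  | _, _ => xs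

def process_strings_alt (my_list : List String) : List String :=
  pvAssignEvens ((pvEveryOther my_list).map (fun x => String.ofList x.toList.reverse)) my_list

-- ===== PRECONDITION & SPEC =====
def Spec_process_strings (my_list : List String) (out : List String) : Prop := out = process_strings_alt my_list
instance (my_list : List String) (out : List String) : Decidable (Spec_process_strings my_list out) := by unfold Spec_process_strings; infer_instance

-- ===== CLAIM (what is proved, stated in full; the proofs are below) =====
def Claim_equal_process_strings : Prop := ∀ (my_list : List String), Dom_process_strings my_list → Spec_process_strings my_list (process_strings my_list)

-- ===== LEMMAS AND PROOFS =====

-- A's loop body, as a structural recursion starting at index s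
def pvGA (s : Int) (xs : List String) : List String :=
  match xs with
  | [] => []
  | w :: ws =>
      (if PySem.Int.mod s 2 ≠ 0 then w else String.ofList w.toList.reverse) :: pvGA (s + 1) ws

theorem pvGA_foldl (xs : List String) (s : Int) (acc : List String) :
    (PySem.List.enumerate xs s).foldl
      (fun new_list (p : Int × String) =>
        if PySem.Int.mod p.1 2 ≠ 0 then
          new_list ++ [p.2]
        else
          new_list ++ [String.ofList p.2.toList.reverse])
      acc = acc ++ pvGA s xs := by
  induction xs generalizing s acc with
  | nil => simp [PySem.List.enumerate_nil, pvGA]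
  | cons x xs ih =>
      rw [PySem.List.enumerate_cons, List.foldl_cons, ih]
      simp only [pvGA]
      rcases Int.emod_two_eq_zero_or_one s with h | h
      · simp [h]
      · simp [h]

theorem pvGA_eq (xs : List String) (s : Int) (hs : s % 2 = 0) :
    pvGA s xs = pvAssignEvens ((pvEveryOther xs).map (fun x => String.ofList x.toList.reverse)) xs := by
  induction xs using pvEveryOther.induct generalizing s with
  | case1 => simp [pvGA, pvEveryOther, pvAssignEvens]
  | case2 x =>
      simp [pvGA, pvEveryOther, pvAssignEvens, hs]
  | case3 x y rest ih =>
      have h1 : (s + 1) % 2 ≠ 0 := by omega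
      have h2 : (s + 2) % 2 = 0 := by omega
      simp [pvGA, pvEveryOther, pvAssignEvens, hs, h1, ih (s + 1 + 1) (by omega)]

-- ===== VERDICT (by name: the statement is the Claim_ definition above) =====
theorem process_strings_spec : Claim_equal_process_strings := by
  intro my_list _
  show process_strings my_list = process_strings_alt my_list
  unfold process_strings process_strings_alt
  rw [pvGA_foldl my_list 0 [], List.nil_append, pvGA_eq my_list 0 (by decide)]
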